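-- pv_equiv track=rewrite | github.com/Capsula12/dashboard-bcra | pages/02_Comparador.py | pick_default_entity
-- ===== SOURCE A (Python) =====
-- import unicodedata
--
-- def _norm_txt(s: str) -> str:
--     if s is None:
--         return ""
--     s = str(s)
--     s = unicodedata.normalize("NFKD", s)
--     s = "".join(ch for ch in s if not unicodedata.combining(ch))
--     return s.lower()
--
-- def pick_default_entity(entities):
--     cand = None
--     for e in entities:
--         se = _norm_txt(e)
--         if "nacion" in se:
--             return e
--         if se.strip() in {"bna", "banco nacion", "banco de la nacion argentina"}:
--             cand = cand or e
--     for code in ["0011", "00011", "11"]: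
--         for e in entities:
--             if e.strip().lstrip("0") == code.lstrip("0"):
--                 return e
--     return cand or (entities[0] if entities else None)
-- ===== SOURCE B (Python) =====
-- import unicodedata
--
-- def _norm_txt(s: str) -> str:
--     if s is None:
--         return ""
--     s = str(s)
--     s = unicodedata.normalize("NFKD", s)
--     s = "".join(ch for ch in s if not unicodedata.combining(ch))
--     return s.lower()
--
-- _BNA = {"bna", "banco nacion", "banco de la nacion argentina"}
--
-- def pick_default_entity(entities):
--     nac = next((e for e in entities if "nacion" in _norm_txt(e)), None)
--     if nac is not None:
--         return nac
--     cod = next((e for e in entities if e.strip().lstrip("0") == "11"), None)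
--     if cod is not None:
--         return cod
--     bna = next((e for e in entities if _norm_txt(e).strip() in _BNA), None)
--     if bna is not None:
--         return bna
--     return entities[0] if entities else None
-- ===== Notes on version B (the rewrite author's own statement) =====
-- stated objective: simpler
-- what changed: Replaces A's fused loop-with-cand-accumulator plus a redundant triple pass over three codes that all normalize to '11' by four independent short-circuiting priority searches (first 'nacion' match, first code-11 match, first BNA-name match, first element).
import Mathlib
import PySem

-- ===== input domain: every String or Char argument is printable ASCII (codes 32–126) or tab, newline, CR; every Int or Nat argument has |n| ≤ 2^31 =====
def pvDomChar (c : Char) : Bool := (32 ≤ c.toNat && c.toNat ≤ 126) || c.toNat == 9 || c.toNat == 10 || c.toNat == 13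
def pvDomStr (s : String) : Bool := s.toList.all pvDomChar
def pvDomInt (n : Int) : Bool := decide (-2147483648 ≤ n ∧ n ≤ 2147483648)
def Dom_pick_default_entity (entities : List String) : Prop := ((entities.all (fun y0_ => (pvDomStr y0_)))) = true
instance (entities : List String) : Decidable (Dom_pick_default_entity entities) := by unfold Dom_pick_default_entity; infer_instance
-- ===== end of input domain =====

-- B replaces A's fused loop-with-accumulator plus redundant triple code loop by four
-- independent short-circuiting priority searches (objective: simpler).
-- On the printable-ASCII domain, _norm_txt's NFKD normalization and combining-mark
-- filter are the identity, so _norm_txt is exactly lowercasing (exact on Dom).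

-- ===== PORT A =====
-- _norm_txt: on ASCII, NFKD and the combining filter are identities; s.lower() remains.
def normTxt (s : String) : String := PySem.Str.lower s

-- str.lstrip("0"): ported by hand (drop leading '0's); exact for this single-char chars argument.
def lstrip0 (s : String) : String := String.mk (s.toList.dropWhile (fun c => c == '0'))

-- the set literal {"bna", "banco nacion", "banco de la nacion argentina"}
def bnaSet : List String := ["bna", "banco nacion", "banco de la nacion argentina"]

-- first loop: early return (.inl e) or fall through with the cand accumulator (.inr cand);
-- `cand = cand or e` follows Python string truthiness (an empty-string cand counts as unset).
def pickA_loop1 : List String → Option String → String ⊕ Option String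
  | [], cand => Sum.inr cand
  | e :: rest, cand =>
    let se := normTxt e
    if PySem.Str.isIn "nacion" se then Sum.inl e
    else if PySem.Str.strip se ∈ bnaSet then
      pickA_loop1 rest (match cand with
                        | none => some e
                        | some c => if c == "" then some e else some c)
    else pickA_loop1 rest cand

-- inner `for e in entities: if e.strip().lstrip("0") == code.lstrip("0"): return e`
def pickA_inner (code : String) : List String → Option String
  | [] => none
  | e :: rest =>
    if lstrip0 (PySem.Str.strip e) == lstrip0 code then some e
    else pickA_inner code rest

-- outer `for code in ["0011", "00011", "11"]`
def pickA_loop2 (entities : List String) : List String → Option String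
  | [] => none
  | code :: rest =>
    match pickA_inner code entities with
    | some e => some e
    | none => pickA_loop2 entities rest

def pick_default_entity (entities : List String) : Option String :=
  match pickA_loop1 entities none with
  | Sum.inl e => some e
  | Sum.inr cand =>
    match pickA_loop2 entities ["0011", "00011", "11"] with
    | some e => some e
    | none =>
      -- `cand or (entities[0] if entities else None)`: Python truthiness on cand
      match cand with
      | some c => if c == "" then entities.head? else some c
      | none => entities.head?

-- ===== PORT B =====
def pick_default_entity_alt (entities : List String) : Option String :=
  match entities.find? (fun e => PySem.Str.isIn "nacion" (normTxt e)) with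
  | some e => some e
  | none =>
    match entities.find? (fun e => lstrip0 (PySem.Str.strip e) == "11") with
    | some e => some e
    | none =>
      match entities.find? (fun e => decide (PySem.Str.strip (normTxt e) ∈ bnaSet)) with
      | some e => some e
      | none => entities.head?

-- ===== PRECONDITION & SPEC =====
def Spec_pick_default_entity (entities : List String) (out : Option String) : Prop := out = pick_default_entity_alt entities
instance (entities : List String) (out : Option String) : Decidable (Spec_pick_default_entity entities out) := by unfold Spec_pick_default_entity; infer_instance

-- ===== CLAIM (what is proved, stated in full; the proofs are below) =====
def Claim_equal_pick_default_entity : Prop := ∀ (entities : List String), Dom_pick_default_entity entities → Spec_pick_default_entity entities (pick_default_entity entities)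

-- ===== LEMMAS AND PROOFS =====

def nacP (e : String) : Bool := PySem.Str.isIn "nacion" (normTxt e)
def bnaP (e : String) : Bool := decide (PySem.Str.strip (normTxt e) ∈ bnaSet)
def codP (e : String) : Bool := lstrip0 (PySem.Str.strip e) == "11"

-- Python `cand or o` on an optional string (empty string is falsy)
def orCand : Option String → Option String → Option String
  | none, o => o
  | some c, o => if c == "" then o else some c

-- an entity passing the BNA test is nonempty
theorem bnaP_ne_empty (e : String) (h : bnaP e = true) : e ≠ "" := by
  intro he; subst he; revert h; decide

theorem orCand_some_ne (c : String) (hc : c ≠ "") (o : Option String) :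
    orCand (some c) o = some c := by
  simp [orCand, hc]

-- one-step unfolding of A's first loop, phrased with the named predicates (defeq)
theorem pickA_loop1_cons (e : String) (rest : List String) (cand : Option String) :
    pickA_loop1 (e :: rest) cand =
      if nacP e then Sum.inl e
      else if bnaP e then pickA_loop1 rest (orCand cand (some e))
      else pickA_loop1 rest cand := by
  simp only [pickA_loop1]
  by_cases hn : nacP e = true
  · have hn' : PySem.Str.isIn "nacion" (normTxt e) = true := hn
    rw [if_pos hn', if_pos hn]
  · have hn' : ¬ PySem.Str.isIn "nacion" (normTxt e) = true := hn
    rw [if_neg hn', if_neg hn]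
    by_cases hb : bnaP e = true
    · have hb' : PySem.Str.strip (normTxt e) ∈ bnaSet := of_decide_eq_true hb
      rw [if_pos hb', if_pos hb]
      cases cand <;> rfl
    · have hb' : PySem.Str.strip (normTxt e) ∉ bnaSet := of_decide_eq_false (eq_false_of_ne_true hb)
      rw [if_neg hb', if_neg hb]

-- characterization of A's first loop: early return = first nacion match,
-- otherwise cand = cand-or-first-BNA match
theorem pickA_loop1_eq (l : List String) (cand : Option String)
    (hcand : ∀ c, cand = some c → c ≠ "") :
    pickA_loop1 l cand =
      match l.find? nacP with
      | some e => Sum.inl e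
      | none => Sum.inr (orCand cand (l.find? bnaP)) := by
  induction l generalizing cand with
  | nil =>
    show Sum.inr cand = Sum.inr (orCand cand none)
    cases cand with
    | none => rfl
    | some c => rw [orCand_some_ne c (hcand c rfl)]
  | cons e rest ih =>
    rw [pickA_loop1_cons]
    by_cases hn : nacP e = true
    · simp only [hn, if_true, List.find?_cons_of_pos hn]
    · have hnf : nacP e = false := eq_false_of_ne_true hn
      simp only [hnf, Bool.false_eq_true, if_false]
      rw [List.find?_cons_of_neg (by simp [hnf])]
      by_cases hb : bnaP e = true
      · have hne : e ≠ "" := bnaP_ne_empty e hb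
        simp only [hb, if_true]
        rw [List.find?_cons_of_pos hb]
        rw [ih _ (by
          intro c hc
          cases cand with
          | none => cases hc; exact hne
          | some c' =>
            have h' := hcand c' rfl
            rw [orCand_some_ne c' h'] at hc; cases hc; exact h')]
        have key : orCand (orCand cand (some e)) (rest.find? bnaP) = orCand cand (some e) := by
          cases cand with
          | none => exact orCand_some_ne e hne _
          | some c => simp [orCand_some_ne c (hcand c rfl)]
        rw [key]
      · have hbf : bnaP e = false := eq_false_of_ne_true hb
        simp only [hbf, Bool.false_eq_true, if_false]
        rw [List.find?_cons_of_neg (by simp [hbf]), ih _ hcand]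

-- the inner code scan is a find?
theorem pickA_inner_eq (code : String) (l : List String) :
    pickA_inner code l = l.find? (fun e => lstrip0 (PySem.Str.strip e) == lstrip0 code) := by
  induction l with
  | nil => rfl
  | cons e rest ih =>
    by_cases h : (lstrip0 (PySem.Str.strip e) == lstrip0 code) = true
    · rw [pickA_inner, if_pos h, List.find?_cons_of_pos (p := fun e => lstrip0 (PySem.Str.strip e) == lstrip0 code) h]
    · rw [pickA_inner, if_neg (by simp_all), List.find?_cons_of_neg (p := fun e => lstrip0 (PySem.Str.strip e) == lstrip0 code) (by simp_all), ih]

-- all three codes collapse to the single "11" search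
theorem pickA_loop2_eq (l : List String) :
    pickA_loop2 l ["0011", "00011", "11"] = l.find? codP := by
  have h1 : lstrip0 "0011" = "11" := by decide
  have h2 : lstrip0 "00011" = "11" := by decide
  have h3 : lstrip0 "11" = "11" := by decide
  have hcod : l.find? codP = l.find? (fun e => lstrip0 (PySem.Str.strip e) == "11") := rfl
  simp only [pickA_loop2, pickA_inner_eq, h1, h2, h3, hcod]
  cases h : l.find? (fun e => lstrip0 (PySem.Str.strip e) == "11") with
  | some e => simp
  | none => simp

-- ===== VERDICT (by name: the statement is the Claim_ definition above) =====
theorem pick_default_entity_spec : Claim_equal_pick_default_entity := by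
  intro entities _
  show pick_default_entity entities = pick_default_entity_alt entities
  unfold pick_default_entity pick_default_entity_alt
  rw [pickA_loop1_eq entities none (by intro c h; cases h)]
  rw [pickA_loop2_eq]
  cases hn : entities.find? nacP with
  | some e =>
    have hn' : entities.find? (fun e => PySem.Str.isIn "nacion" (normTxt e)) = some e := hn
    rw [hn']
  | none =>
    have hn' : entities.find? (fun e => PySem.Str.isIn "nacion" (normTxt e)) = none := hn
    rw [hn']
    cases hc : entities.find? codP with
    | some e =>
      have hc' : entities.find? (fun e => lstrip0 (PySem.Str.strip e) == "11") = some e := hc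
      rw [hc']
    | none =>
      have hc' : entities.find? (fun e => lstrip0 (PySem.Str.strip e) == "11") = none := hc
      rw [hc']
      cases hb : entities.find? bnaP with
      | some c =>
        have hcne : c ≠ "" := bnaP_ne_empty c (List.find?_some hb)
        have hb' : entities.find? (fun e => decide (PySem.Str.strip (normTxt e) ∈ bnaSet)) = some c := hb
        have ho : orCand none (some c) = some c := rfl
        rw [hb', ho]
        show (if (c == "") = true then entities.head? else some c) = some c
        rw [if_neg (by simp [hcne])]
      | none =>
        have hb' : entities.find? (fun e => decide (PySem.Str.strip (normTxt e) ∈ bnaSet)) = none := hb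
        rw [hb']
        rfl
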